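-- pv_equiv track=rewrite | github.com/shh4und/cend | src/cend/core/skeletonization.py | _get_26_neighborhood
-- ===== SOURCE A (Python) =====
-- from typing import Dict, List, Optional, Set, Tuple
--
-- def _get_26_neighborhood(
--     voxel: Tuple[int, int, int], shape: Tuple[int, int, int]
-- ) -> List[Tuple[int, int, int]]:
--     """
--     Gets the 26-connected neighbors of a voxel within volume bounds.
--
--     Args:
--         voxel: The center voxel (z, y, x).
--         shape: Shape of the volume (z, y, x).
--
--     Returns:
--         List of valid neighbor coordinates.
--     """
--     z, y, x = voxel
--     neighbors = []
--     for dz in [-1, 0, 1]: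
--         for dy in [-1, 0, 1]:
--             for dx in [-1, 0, 1]:
--                 if dz == 0 and dy == 0 and dx == 0:
--                     continue
--                 nz, ny, nx = z + dz, y + dy, x + dx
--                 if 0 <= nz < shape[0] and 0 <= ny < shape[1] and 0 <= nx < shape[2]:
--                     neighbors.append((nz, ny, nx))
--     return neighbors
-- ===== SOURCE B (Python) =====
-- from typing import Dict, List, Optional, Set, Tuple
--
-- def _get_26_neighborhood(
--     voxel: Tuple[int, int, int], shape: Tuple[int, int, int]
-- ) -> List[Tuple[int, int, int]]:
--     """Staged construction: build the clamped bounding box axis by axis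
--     (z-values, then (z,y) pairs, then triples) with no per-cell test,
--     then delete the center voxel once if it lies inside the volume."""
--     z, y, x = voxel
--     zs = list(range(max(0, z - 1), min(shape[0], z + 2)))
--     zys = [(a, b) for a in zs for b in range(max(0, y - 1), min(shape[1], y + 2))]
--     box = [(a, b, c) for (a, b) in zys for c in range(max(0, x - 1), min(shape[2], x + 2))]
--     if 0 <= z < shape[0] and 0 <= y < shape[1] and 0 <= x < shape[2]:
--         box.remove(voxel)
--     return box
-- ===== Notes on version B (the rewrite author's own statement) =====
-- stated objective: alternative
-- what changed: A runs one triple-nested loop over the 26 offsets testing each cell for bounds and for being the center; B instead builds the clamped bounding box in staged passes (z-list, then (z,y)-pair list, then triple list) with no per-cell test, and finally deletes the center voxel with a single guarded list.remove.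
import Mathlib
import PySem

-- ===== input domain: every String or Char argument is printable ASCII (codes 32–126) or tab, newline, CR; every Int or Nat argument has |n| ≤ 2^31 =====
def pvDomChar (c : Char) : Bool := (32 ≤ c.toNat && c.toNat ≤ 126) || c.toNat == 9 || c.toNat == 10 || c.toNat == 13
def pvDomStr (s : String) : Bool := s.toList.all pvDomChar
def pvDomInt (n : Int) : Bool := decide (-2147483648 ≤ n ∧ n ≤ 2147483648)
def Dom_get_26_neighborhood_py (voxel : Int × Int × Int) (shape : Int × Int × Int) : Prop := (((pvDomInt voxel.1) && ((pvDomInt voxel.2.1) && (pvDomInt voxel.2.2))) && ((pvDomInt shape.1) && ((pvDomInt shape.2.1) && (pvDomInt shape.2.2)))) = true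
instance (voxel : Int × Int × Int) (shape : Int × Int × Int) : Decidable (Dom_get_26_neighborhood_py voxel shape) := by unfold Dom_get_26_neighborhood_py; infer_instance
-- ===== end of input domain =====

-- B replaces A's 26-offset triple loop with per-cell bounds-and-center tests by a staged
-- construction of the clamped bounding box (z-list, (z,y)-pair list, triple list; no
-- per-cell test) followed by one guarded deletion of the center; objective: alternative.

-- ===== PORT A =====
def get_26_neighborhood_py (voxel : Int × Int × Int) (shape : Int × Int × Int) : List (Int × Int × Int) :=
  let z := voxel.1
  let y := voxel.2.1
  let x := voxel.2.2
  List.foldl (fun acc dz =>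
    List.foldl (fun acc dy =>
      List.foldl (fun acc dx =>
        if dz = 0 ∧ dy = 0 ∧ dx = 0 then acc
        else
          if 0 ≤ z + dz ∧ z + dz < shape.1 ∧ 0 ≤ y + dy ∧ y + dy < shape.2.1 ∧
              0 ≤ x + dx ∧ x + dx < shape.2.2 then
            acc ++ [(z + dz, y + dy, x + dx)]
          else acc)
        acc [(-1 : Int), 0, 1])
      acc [(-1 : Int), 0, 1])
    [] [(-1 : Int), 0, 1]

-- ===== PORT B =====
def get_26_neighborhood_py_alt (voxel : Int × Int × Int) (shape : Int × Int × Int) : List (Int × Int × Int) :=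
  let z := voxel.1
  let y := voxel.2.1
  let x := voxel.2.2
  let zs := PySem.List.pyRange (max 0 (z - 1)) (min shape.1 (z + 2)) 1
  let zys := zs.flatMap (fun a =>
    (PySem.List.pyRange (max 0 (y - 1)) (min shape.2.1 (y + 2)) 1).map (fun b => (a, b)))
  let box := zys.flatMap (fun p =>
    (PySem.List.pyRange (max 0 (x - 1)) (min shape.2.2 (x + 2)) 1).map (fun c => (p.1, p.2, c)))
  if 0 ≤ z ∧ z < shape.1 ∧ 0 ≤ y ∧ y < shape.2.1 ∧ 0 ≤ x ∧ x < shape.2.2 then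
    match PySem.List.remove? box voxel with
    | some l => l
    | none => box   -- unreachable: the guard guarantees the center lies in the box
  else box

-- ===== PRECONDITION & SPEC =====
def Spec_get_26_neighborhood_py (voxel : Int × Int × Int) (shape : Int × Int × Int) (out : List (Int × Int × Int)) : Prop := out = get_26_neighborhood_py_alt voxel shape
instance (voxel : Int × Int × Int) (shape : Int × Int × Int) (out : List (Int × Int × Int)) : Decidable (Spec_get_26_neighborhood_py voxel shape out) := by unfold Spec_get_26_neighborhood_py; infer_instance

-- ===== CLAIM (what is proved, stated in full; the proofs are below) =====
def Claim_equal_get_26_neighborhood_py : Prop := ∀ (voxel : Int × Int × Int) (shape : Int × Int × Int), Dom_get_26_neighborhood_py voxel shape → Spec_get_26_neighborhood_py voxel shape (get_26_neighborhood_py voxel shape)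

-- ===== LEMMAS AND PROOFS =====

-- the clamped box B builds, as it appears in get_26_neighborhood_py_alt
def pvBox (z y x s0 s1 s2 : Int) : List (Int × Int × Int) :=
  ((PySem.List.pyRange (max 0 (z - 1)) (min s0 (z + 2)) 1).flatMap (fun a =>
    (PySem.List.pyRange (max 0 (y - 1)) (min s1 (y + 2)) 1).map (fun b => (a, b)))).flatMap (fun p =>
      (PySem.List.pyRange (max 0 (x - 1)) (min s2 (x + 2)) 1).map (fun c => (p.1, p.2, c)))

-- common middle form both sides are reduced to
def pvMid (z y x s0 s1 s2 : Int) : List (Int × Int × Int) :=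
  [z - 1, z, z + 1].flatMap (fun nz =>
    [y - 1, y, y + 1].flatMap (fun ny =>
      [x - 1, x, x + 1].flatMap (fun nx =>
        if (nz, ny, nx) = (z, y, x) then []
        else if (0 ≤ nz ∧ nz < s0) ∧ (0 ≤ ny ∧ ny < s1) ∧ (0 ≤ nx ∧ nx < s2) then
          [(nz, ny, nx)]
        else [])))

-- A's innermost loop (skip-center, append-if-in-bounds) as a flatMap
theorem pv_foldl_skip_append {α β : Type} (p q : α → Prop) [DecidablePred p] [DecidablePred q]
    (f : α → β) (l : List α) (acc : List β) :
    List.foldl (fun acc x => if p x then acc else if q x then acc ++ [f x] else acc) acc l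
      = acc ++ l.flatMap (fun x => if p x then [] else if q x then [f x] else []) := by
  induction l generalizing acc with
  | nil => simp
  | cons a t ih => simp only [List.foldl, List.flatMap_cons, ih]; split_ifs <;> simp

-- the clamped range is exactly the in-bounds part of [c-1, c, c+1]
theorem pv_range3 (s c : Int) :
    PySem.List.pyRange (max 0 (c - 1)) (min s (c + 2)) 1
      = List.filter (fun n => decide (0 ≤ n ∧ n < s)) [c - 1, c, c + 1] := by
  by_cases p1 : 0 ≤ c - 1 ∧ c - 1 < s <;>
    by_cases p2 : 0 ≤ c ∧ c < s <;>
      by_cases p3 : 0 ≤ c + 1 ∧ c + 1 < s <;>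
        [skip; skip; exact absurd ⟨by omega, by omega⟩ p2; skip; skip; skip; skip; skip] <;>
    [rw [show max 0 (c - 1) = c - 1 by omega, show min s (c + 2) = c + 2 by omega,
       PySem.List.pyRange_one_cons (by omega), PySem.List.pyRange_one_cons (by omega),
       PySem.List.pyRange_one_cons (by omega), PySem.List.pyRange_one_eq_nil (by omega)];
     rw [show max 0 (c - 1) = c - 1 by omega, show min s (c + 2) = s by omega,
       PySem.List.pyRange_one_cons (by omega), PySem.List.pyRange_one_cons (by omega),
       PySem.List.pyRange_one_eq_nil (by omega)];
     rw [show max 0 (c - 1) = c - 1 by omega, show min s (c + 2) = s by omega,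
       PySem.List.pyRange_one_cons (by omega), PySem.List.pyRange_one_eq_nil (by omega)];
     rw [show max 0 (c - 1) = c by omega, show min s (c + 2) = c + 2 by omega,
       PySem.List.pyRange_one_cons (by omega), PySem.List.pyRange_one_cons (by omega),
       PySem.List.pyRange_one_eq_nil (by omega)];
     rw [show max 0 (c - 1) = c by omega, show min s (c + 2) = c + 1 by omega,
       PySem.List.pyRange_one_cons (by omega), PySem.List.pyRange_one_eq_nil (by omega)];
     rw [show max 0 (c - 1) = c + 1 by omega, show min s (c + 2) = c + 2 by omega,
       PySem.List.pyRange_one_cons (by omega), PySem.List.pyRange_one_eq_nil (by omega)];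
     rw [PySem.List.pyRange_one_eq_nil (by omega)]] <;>
    · rw [show (List.filter (fun n => decide (0 ≤ n ∧ n < s)) [c - 1, c, c + 1])
            = (if decide (0 ≤ c - 1 ∧ c - 1 < s) = true then [c - 1] else []) ++
              ((if decide (0 ≤ c ∧ c < s) = true then [c] else []) ++
                (if decide (0 ≤ c + 1 ∧ c + 1 < s) = true then [c + 1] else [])) from by
            simp [List.filter_cons]; split_ifs <;> simp]
      simp only [decide_eq_true_eq]
      split_ifs <;> simp_all

-- flatMap over a filtered list = flatMap with an if
theorem pv_flatMap_filter {α β : Type} (p : α → Prop) [DecidablePred p]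
    (f : α → List β) (l : List α) :
    (List.filter (fun a => decide (p a)) l).flatMap f
      = l.flatMap (fun a => if p a then f a else []) := by
  induction l with
  | nil => rfl
  | cons a t ih =>
    by_cases h : p a <;> simp [h, ih]

-- pushing an if through flatMap
theorem pv_if_flatMap {α β : Type} (c : Prop) [Decidable c] (l : List α) (f : α → List β) :
    (if c then l.flatMap f else []) = l.flatMap (fun a => if c then f a else []) := by
  split_ifs <;> simp_all

-- leaf reassociation between the filtered-box form and A's skip-then-conjunction form
theorem pv_leaf {β : Type} (c1 c2 c3 e : Prop)
    [Decidable c1] [Decidable c2] [Decidable c3] [Decidable e] (t : β) :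
    (if c1 then if c2 then if c3 then (if ¬e then [t] else ([] : List β)) else [] else [] else [])
      = (if e then [] else if c1 ∧ c2 ∧ c3 then [t] else []) := by
  split_ifs <;> simp_all

theorem pv_A_eq_mid (z y x s0 s1 s2 : Int) :
    get_26_neighborhood_py (z, y, x) (s0, s1, s2) = pvMid z y x s0 s1 s2 := by
  show List.foldl _ _ _ = _
  simp only [pv_foldl_skip_append, PySem.List.foldl_append_eq_flatMap, List.nil_append]
  unfold pvMid
  simp [List.flatMap_cons, Prod.mk.injEq, and_assoc, sub_eq_self]
  ring_nf

-- filtering the center out of the box gives the middle form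
theorem pv_box_nested (z y x s0 s1 s2 : Int) :
    pvBox z y x s0 s1 s2
      = (PySem.List.pyRange (max 0 (z - 1)) (min s0 (z + 2)) 1).flatMap (fun a =>
          (PySem.List.pyRange (max 0 (y - 1)) (min s1 (y + 2)) 1).flatMap (fun b =>
            (PySem.List.pyRange (max 0 (x - 1)) (min s2 (x + 2)) 1).flatMap (fun c =>
              [(a, b, c)]))) := by
  unfold pvBox
  simp only [List.flatMap_assoc, List.map_eq_flatMap]
  simp [List.flatMap_cons, List.flatMap_nil]

theorem pv_box_filter_eq_mid (z y x s0 s1 s2 : Int) :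
    (pvBox z y x s0 s1 s2).filter (fun t => t != (z, y, x)) = pvMid z y x s0 s1 s2 := by
  rw [pv_box_nested]
  simp only [List.filter_flatMap, List.filter_cons, List.filter_nil, bne_iff_ne, ne_eq]
  simp only [pv_range3, pv_flatMap_filter, pv_if_flatMap]
  unfold pvMid
  congr 1
  funext nz
  congr 1
  funext ny
  congr 1
  funext nx
  rw [← pv_leaf (0 ≤ nz ∧ nz < s0) (0 ≤ ny ∧ ny < s1) (0 ≤ nx ∧ nx < s2)
    ((nz, ny, nx) = (z, y, x)) (nz, ny, nx)]

theorem pv_box_nodup (z y x s0 s1 s2 : Int) : (pvBox z y x s0 s1 s2).Nodup := by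
  rw [pv_box_nested]
  refine List.nodup_flatMap.2 ⟨fun a _ => ?_,
    List.Pairwise.imp ?_ (PySem.List.nodup_pyRange_one _ _)⟩
  · refine List.nodup_flatMap.2 ⟨fun b _ => ?_,
      List.Pairwise.imp ?_ (PySem.List.nodup_pyRange_one _ _)⟩
    · rw [← List.map_eq_flatMap]
      refine List.Nodup.map ?_ (PySem.List.nodup_pyRange_one _ _)
      intro c c' h
      simpa using h
    · intro b b' hne t ht ht'
      simp only [List.mem_flatMap, List.mem_singleton] at ht ht'
      obtain ⟨c, _, rfl⟩ := ht
      obtain ⟨c', _, h⟩ := ht'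
      simp only [Prod.mk.injEq] at h
      exact hne h.2.1
  · intro a a' hne t ht ht'
    simp only [List.mem_flatMap, List.mem_singleton] at ht ht'
    obtain ⟨b, _, c, _, rfl⟩ := ht
    obtain ⟨b', _, c', _, h⟩ := ht'
    simp only [Prod.mk.injEq] at h
    exact hne h.1

theorem pv_mem_box (z y x s0 s1 s2 : Int) :
    (z, y, x) ∈ pvBox z y x s0 s1 s2 ↔ 0 ≤ z ∧ z < s0 ∧ 0 ≤ y ∧ y < s1 ∧ 0 ≤ x ∧ x < s2 := by
  rw [pv_box_nested]
  simp only [List.mem_flatMap, List.mem_singleton, PySem.List.mem_pyRange_one, Prod.mk.injEq]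
  constructor
  · rintro ⟨a, ha, b, hb, c, hc, rfl, rfl, rfl⟩
    omega
  · rintro ⟨h1, h2, h3, h4, h5, h6⟩
    exact ⟨z, by omega, y, by omega, x, by omega, rfl, rfl, rfl⟩

theorem pv_B_eq (z y x s0 s1 s2 : Int) :
    get_26_neighborhood_py_alt (z, y, x) (s0, s1, s2)
      = (pvBox z y x s0 s1 s2).filter (fun t => t != (z, y, x)) := by
  show (if 0 ≤ z ∧ z < s0 ∧ 0 ≤ y ∧ y < s1 ∧ 0 ≤ x ∧ x < s2 then
          match PySem.List.remove? (pvBox z y x s0 s1 s2) (z, y, x) with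
          | some l => l
          | none => pvBox z y x s0 s1 s2
        else pvBox z y x s0 s1 s2) = _
  by_cases h : 0 ≤ z ∧ z < s0 ∧ 0 ≤ y ∧ y < s1 ∧ 0 ≤ x ∧ x < s2
  · rw [if_pos h, PySem.List.remove?_eq_some_erase _ _ ((pv_mem_box z y x s0 s1 s2).2 h)]
    exact (pv_box_nodup z y x s0 s1 s2).erase_eq_filter _
  · rw [if_neg h]
    refine (List.filter_eq_self.2 ?_).symm
    intro t ht
    simp only [bne_iff_ne, ne_eq]
    rintro rfl
    exact h ((pv_mem_box z y x s0 s1 s2).1 ht)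

-- ===== VERDICT (by name: the statement is the Claim_ definition above) =====
theorem get_26_neighborhood_py_spec : Claim_equal_get_26_neighborhood_py := by
  intro voxel shape _
  obtain ⟨z, y, x⟩ := voxel
  obtain ⟨s0, s1, s2⟩ := shape
  show get_26_neighborhood_py _ _ = _
  rw [pv_A_eq_mid, pv_B_eq, pv_box_filter_eq_mid]
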